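-- pv_equiv track=rewrite | github.com/bel1ch1/DotaHelper_Startap | Data_From_Api/parse_match_data/accumulate_dataset.py | get_kills_advantage_per_stage
-- ===== SOURCE A (Python) =====
-- def get_kills_advantage_per_stage(radiant, dire):
--     """
--     Returns the vector of advantages for each stage if it has reached it
--     """
--     result = []
--     n = len(radiant)
--     group_0 = []
--     group_1 = []
--     group_2 = []
--     group_3 = []
--     group_4 = []
--     group_5 = []
--     group_6 = []
--     for i in range(n-1):
--         res = radiant[i] - dire[i]
--         if i <= 5:
--             group_0.append(res)
--         elif i >= 6 and i <= 15:
--             group_1.append(res)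
--         elif i >= 16 and i <= 25:
--             group_2.append(res)
--         elif i >= 26 and i <= 35:
--             group_3.append(res)
--         elif i >= 36 and i <= 45:
--             group_4.append(res)
--         elif i >= 46 and i <= 60:
--             group_5.append(res)
--         elif i > 60:
--             group_6.append(res)
--     if group_0:
--       result.append(sum(group_0))
--     if group_1:
--       result.append(sum(group_1))
--     if group_2:
--       result.append(sum(group_2))
--     if group_3:
--       result.append(sum(group_3))
--     if group_4:
--       result.append(sum(group_4))
--     if group_5:
--       result.append(sum(group_5))
--     if group_6:
--       result.append(sum(group_6))
--
--     return result
-- ===== SOURCE B (Python) =====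
-- def get_kills_advantage_per_stage(radiant, dire):
--     m = len(radiant) - 1
--     P = [0]
--     for i in range(m):
--         P.append(P[-1] + radiant[i] - dire[i])
--     out = []
--     for lo, hi in [(0, 5), (6, 15), (16, 25), (26, 35), (36, 45), (46, 60), (61, m - 1)]:
--         hi = min(hi, m - 1)
--         if lo <= hi:
--             out.append(P[hi + 1] - P[lo])
--     return out
-- ===== Notes on version B (the rewrite author's own statement) =====
-- stated objective: simpler
-- what changed: Replaces the seven explicit accumulator lists and seven conditional sum-appends by a prefix-sum array over the difference stream and a single loop over fixed (lo,hi) stage bounds, emitting P[hi+1]-P[lo] for each non-empty clamped range.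
import Mathlib
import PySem

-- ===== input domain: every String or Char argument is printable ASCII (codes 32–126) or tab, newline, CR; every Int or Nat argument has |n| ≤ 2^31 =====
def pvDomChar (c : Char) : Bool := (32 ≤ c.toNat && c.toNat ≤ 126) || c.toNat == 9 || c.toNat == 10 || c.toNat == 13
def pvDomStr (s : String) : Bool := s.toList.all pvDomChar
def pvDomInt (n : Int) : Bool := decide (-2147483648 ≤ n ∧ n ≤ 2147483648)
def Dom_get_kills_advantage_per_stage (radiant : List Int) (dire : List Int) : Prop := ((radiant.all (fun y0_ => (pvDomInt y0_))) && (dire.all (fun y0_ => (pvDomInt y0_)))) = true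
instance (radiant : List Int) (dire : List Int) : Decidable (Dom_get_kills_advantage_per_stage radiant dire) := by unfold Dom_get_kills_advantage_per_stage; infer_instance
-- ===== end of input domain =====

-- B replaces A's seven accumulator lists with a prefix-sum array and one loop over fixed stage bounds (simpler decomposition, same O(n) cost).
-- ===== PORT A =====
def pvStepA (radiant : List Int) (dire : List Int)
    (g : List Int × List Int × List Int × List Int × List Int × List Int × List Int) (i : Int) :
    List Int × List Int × List Int × List Int × List Int × List Int × List Int :=
  let res := PySem.List.pyGetD radiant i 0 - PySem.List.pyGetD dire i 0
  if i ≤ 5 then (g.1 ++ [res], g.2.1, g.2.2.1, g.2.2.2.1, g.2.2.2.2.1, g.2.2.2.2.2.1, g.2.2.2.2.2.2)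
  else if 6 ≤ i ∧ i ≤ 15 then (g.1, g.2.1 ++ [res], g.2.2.1, g.2.2.2.1, g.2.2.2.2.1, g.2.2.2.2.2.1, g.2.2.2.2.2.2)
  else if 16 ≤ i ∧ i ≤ 25 then (g.1, g.2.1, g.2.2.1 ++ [res], g.2.2.2.1, g.2.2.2.2.1, g.2.2.2.2.2.1, g.2.2.2.2.2.2)
  else if 26 ≤ i ∧ i ≤ 35 then (g.1, g.2.1, g.2.2.1, g.2.2.2.1 ++ [res], g.2.2.2.2.1, g.2.2.2.2.2.1, g.2.2.2.2.2.2)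
  else if 36 ≤ i ∧ i ≤ 45 then (g.1, g.2.1, g.2.2.1, g.2.2.2.1, g.2.2.2.2.1 ++ [res], g.2.2.2.2.2.1, g.2.2.2.2.2.2)
  else if 46 ≤ i ∧ i ≤ 60 then (g.1, g.2.1, g.2.2.1, g.2.2.2.1, g.2.2.2.2.1, g.2.2.2.2.2.1 ++ [res], g.2.2.2.2.2.2)
  else if 60 < i then (g.1, g.2.1, g.2.2.1, g.2.2.2.1, g.2.2.2.2.1, g.2.2.2.2.2.1, g.2.2.2.2.2.2 ++ [res])
  else g

def get_kills_advantage_per_stage (radiant : List Int) (dire : List Int) : List Int :=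
  let n : Int := radiant.length
  let g := (PySem.List.pyRange 0 (n - 1)).foldl (pvStepA radiant dire) ([], [], [], [], [], [], [])
  (if g.1 ≠ [] then [g.1.sum] else []) ++
  (if g.2.1 ≠ [] then [g.2.1.sum] else []) ++
  (if g.2.2.1 ≠ [] then [g.2.2.1.sum] else []) ++
  (if g.2.2.2.1 ≠ [] then [g.2.2.2.1.sum] else []) ++
  (if g.2.2.2.2.1 ≠ [] then [g.2.2.2.2.1.sum] else []) ++
  (if g.2.2.2.2.2.1 ≠ [] then [g.2.2.2.2.2.1.sum] else []) ++
  (if g.2.2.2.2.2.2 ≠ [] then [g.2.2.2.2.2.2.sum] else [])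

-- ===== PORT B =====
def pvStepP (radiant : List Int) (dire : List Int) (P : List Int) (i : Int) : List Int :=
  P ++ [PySem.List.pyGetD P (-1) 0 + PySem.List.pyGetD radiant i 0 - PySem.List.pyGetD dire i 0]

def pvStepOut (m : Int) (P : List Int) (out : List Int) (b : Int × Int) : List Int :=
  let hi := min b.2 (m - 1)
  if b.1 ≤ hi then out ++ [PySem.List.pyGetD P (hi + 1) 0 - PySem.List.pyGetD P b.1 0] else out

def get_kills_advantage_per_stage_alt (radiant : List Int) (dire : List Int) : List Int :=
  let m : Int := radiant.length - 1
  let P := (PySem.List.pyRange 0 m).foldl (pvStepP radiant dire) [0]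
  ([((0 : Int), (5 : Int)), (6, 15), (16, 25), (26, 35), (36, 45), (46, 60), (61, m - 1)]).foldl
    (pvStepOut m P) []

-- ===== PRECONDITION & SPEC =====
-- Pre_ excludes exactly the inputs on which Python A raises IndexError: dire shorter than len(radiant)-1.
def Pre_get_kills_advantage_per_stage (radiant : List Int) (dire : List Int) : Prop :=
  radiant.length ≤ dire.length + 1
instance (radiant : List Int) (dire : List Int) : Decidable (Pre_get_kills_advantage_per_stage radiant dire) := by unfold Pre_get_kills_advantage_per_stage; infer_instance
def pvWitness_get_kills_advantage_per_stage : List Int × List Int := ([3, 1, 4], [1, 5, 9])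
def Spec_get_kills_advantage_per_stage (radiant : List Int) (dire : List Int) (out : List Int) : Prop := out = get_kills_advantage_per_stage_alt radiant dire
instance (radiant : List Int) (dire : List Int) (out : List Int) : Decidable (Spec_get_kills_advantage_per_stage radiant dire out) := by unfold Spec_get_kills_advantage_per_stage; infer_instance

-- ===== CLAIM (what is proved, stated in full; the proofs are below) =====
def Claim_equal_get_kills_advantage_per_stage : Prop := ∀ (radiant : List Int) (dire : List Int), Dom_get_kills_advantage_per_stage radiant dire → Pre_get_kills_advantage_per_stage radiant dire → Spec_get_kills_advantage_per_stage radiant dire (get_kills_advantage_per_stage radiant dire)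

-- ===== LEMMAS AND PROOFS =====

-- The pointwise kill difference, prefix sums, and the slice of differences a stage collects.
def pvD (radiant dire : List Int) (i : Nat) : Int := radiant.getD i 0 - dire.getD i 0
def pvS (radiant dire : List Int) (j : Nat) : Int := ((List.range j).map (pvD radiant dire)).sum
def pvSeg (radiant dire : List Int) (lo hi k : Nat) : List Int :=
  (List.range' lo (min (hi + 1) k - lo)).map (pvD radiant dire)

theorem pvS_succ (r d : List Int) (k : Nat) : pvS r d (k + 1) = pvS r d k + pvD r d k := by
  simp [pvS, List.range_succ]

theorem pvSum_range' (r d : List Int) (a c : Nat) :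
    ((List.range' a c).map (pvD r d)).sum = pvS r d (a + c) - pvS r d a := by
  induction c with
  | zero => simp
  | succ c ih =>
      rw [List.range'_concat]
      simp only [List.map_append, List.sum_append, ih, List.map_cons, List.map_nil,
        List.sum_cons, List.sum_nil]
      have h1 : a + (c + 1) = (a + c) + 1 := by omega
      rw [h1, pvS_succ]
      have h2 : a + 1 * c = a + c := by omega
      rw [h2]; ring

theorem pvSeg_succ_mem (r d : List Int) (lo hi k : Nat) (h1 : lo ≤ k) (h2 : k ≤ hi) :
    pvSeg r d lo hi (k + 1) = pvSeg r d lo hi k ++ [pvD r d k] := by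
  unfold pvSeg
  have hc : min (hi + 1) (k + 1) - lo = (min (hi + 1) k - lo) + 1 := by omega
  rw [hc, List.range'_concat]
  have hk : lo + 1 * (min (hi + 1) k - lo) = k := by omega
  have hk' : lo + (min (hi + 1) k - lo) = k := by omega
  simp [hk']

theorem pvSeg_succ_out (r d : List Int) (lo hi k : Nat) (h : k < lo ∨ hi < k) :
    pvSeg r d lo hi (k + 1) = pvSeg r d lo hi k := by
  unfold pvSeg
  have hc : min (hi + 1) (k + 1) - lo = min (hi + 1) k - lo := by omega
  rw [hc]

theorem pvFoldA (r d : List Int) (k : Nat) :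
    ((List.range k).map Int.ofNat).foldl (pvStepA r d) ([], [], [], [], [], [], []) =
      (pvSeg r d 0 5 k, pvSeg r d 6 15 k, pvSeg r d 16 25 k, pvSeg r d 26 35 k,
       pvSeg r d 36 45 k, pvSeg r d 46 60 k, (List.range' 61 (k - 61)).map (pvD r d)) := by
  induction k with
  | zero => simp [pvSeg]
  | succ k ih =>
      rw [List.range_succ, List.map_append, List.foldl_append, ih]
      simp only [List.map_cons, List.map_nil, List.foldl_cons, List.foldl_nil]
      unfold pvStepA
      simp only [Int.ofNat_eq_natCast, PySem.List.pyGetD_natCast]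
      have hres : r[k]?.getD 0 - d[k]?.getD 0 = pvD r d k := by simp [pvD, List.getD]
      by_cases h0 : k ≤ 5
      · have c0 : ((k : Int) ≤ 5) := by exact_mod_cast h0
        rw [if_pos c0]
        simp [hres, pvSeg_succ_mem r d 0 5 k (by omega) h0,
          pvSeg_succ_out r d 6 15 k (by omega), pvSeg_succ_out r d 16 25 k (by omega),
          pvSeg_succ_out r d 26 35 k (by omega), pvSeg_succ_out r d 36 45 k (by omega),
          pvSeg_succ_out r d 46 60 k (by omega), show k + 1 - 61 = k - 61 by omega]
      · have c0 : ¬ ((k : Int) ≤ 5) := by exact_mod_cast h0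
        rw [if_neg c0]
        by_cases h1 : k ≤ 15
        · have c1 : (6 ≤ (k : Int) ∧ (k : Int) ≤ 15) := by constructor <;> [exact_mod_cast (by omega : 6 ≤ k); exact_mod_cast h1]
          rw [if_pos c1]
          simp [hres, pvSeg_succ_mem r d 6 15 k (by omega) h1,
            pvSeg_succ_out r d 0 5 k (by omega), pvSeg_succ_out r d 16 25 k (by omega),
            pvSeg_succ_out r d 26 35 k (by omega), pvSeg_succ_out r d 36 45 k (by omega),
            pvSeg_succ_out r d 46 60 k (by omega), show k + 1 - 61 = k - 61 by omega]
        · have c1 : ¬ (6 ≤ (k : Int) ∧ (k : Int) ≤ 15) := by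
            intro hc; exact h1 (by exact_mod_cast hc.2)
          rw [if_neg c1]
          by_cases h2 : k ≤ 25
          · have c2 : (16 ≤ (k : Int) ∧ (k : Int) ≤ 25) := by constructor <;> [exact_mod_cast (by omega : 16 ≤ k); exact_mod_cast h2]
            rw [if_pos c2]
            simp [hres, pvSeg_succ_mem r d 16 25 k (by omega) h2,
              pvSeg_succ_out r d 0 5 k (by omega), pvSeg_succ_out r d 6 15 k (by omega),
              pvSeg_succ_out r d 26 35 k (by omega), pvSeg_succ_out r d 36 45 k (by omega),
              pvSeg_succ_out r d 46 60 k (by omega), show k + 1 - 61 = k - 61 by omega]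
          · have c2 : ¬ (16 ≤ (k : Int) ∧ (k : Int) ≤ 25) := by
              intro hc; exact h2 (by exact_mod_cast hc.2)
            rw [if_neg c2]
            by_cases h3 : k ≤ 35
            · have c3 : (26 ≤ (k : Int) ∧ (k : Int) ≤ 35) := by constructor <;> [exact_mod_cast (by omega : 26 ≤ k); exact_mod_cast h3]
              rw [if_pos c3]
              simp [hres, pvSeg_succ_mem r d 26 35 k (by omega) h3,
                pvSeg_succ_out r d 0 5 k (by omega), pvSeg_succ_out r d 6 15 k (by omega),
                pvSeg_succ_out r d 16 25 k (by omega), pvSeg_succ_out r d 36 45 k (by omega),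
                pvSeg_succ_out r d 46 60 k (by omega), show k + 1 - 61 = k - 61 by omega]
            · have c3 : ¬ (26 ≤ (k : Int) ∧ (k : Int) ≤ 35) := by
                intro hc; exact h3 (by exact_mod_cast hc.2)
              rw [if_neg c3]
              by_cases h4 : k ≤ 45
              · have c4 : (36 ≤ (k : Int) ∧ (k : Int) ≤ 45) := by constructor <;> [exact_mod_cast (by omega : 36 ≤ k); exact_mod_cast h4]
                rw [if_pos c4]
                simp [hres, pvSeg_succ_mem r d 36 45 k (by omega) h4,
                  pvSeg_succ_out r d 0 5 k (by omega), pvSeg_succ_out r d 6 15 k (by omega),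
                  pvSeg_succ_out r d 16 25 k (by omega), pvSeg_succ_out r d 26 35 k (by omega),
                  pvSeg_succ_out r d 46 60 k (by omega), show k + 1 - 61 = k - 61 by omega]
              · have c4 : ¬ (36 ≤ (k : Int) ∧ (k : Int) ≤ 45) := by
                  intro hc; exact h4 (by exact_mod_cast hc.2)
                rw [if_neg c4]
                by_cases h5 : k ≤ 60
                · have c5 : (46 ≤ (k : Int) ∧ (k : Int) ≤ 60) := by constructor <;> [exact_mod_cast (by omega : 46 ≤ k); exact_mod_cast h5]
                  rw [if_pos c5]
                  simp [hres, pvSeg_succ_mem r d 46 60 k (by omega) h5,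
                    pvSeg_succ_out r d 0 5 k (by omega), pvSeg_succ_out r d 6 15 k (by omega),
                    pvSeg_succ_out r d 16 25 k (by omega), pvSeg_succ_out r d 26 35 k (by omega),
                    pvSeg_succ_out r d 36 45 k (by omega), show k + 1 - 61 = k - 61 by omega]
                · have c5 : ¬ (46 ≤ (k : Int) ∧ (k : Int) ≤ 60) := by
                    intro hc; exact h5 (by exact_mod_cast hc.2)
                  rw [if_neg c5]
                  have c6 : (60 : Int) < (k : Int) := by exact_mod_cast (by omega : 60 < k)
                  rw [if_pos c6]
                  have htop : List.range' 61 (k - 60) = List.range' 61 (k - 61) ++ [k] := by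
                    have hc : k - 60 = (k - 61) + 1 := by omega
                    rw [hc, List.range'_concat]
                    have h2 : 61 + 1 * (k - 61) = k := by omega
                    rw [h2]
                  simp [hres, htop,
                    pvSeg_succ_out r d 0 5 k (by omega), pvSeg_succ_out r d 6 15 k (by omega),
                    pvSeg_succ_out r d 16 25 k (by omega), pvSeg_succ_out r d 26 35 k (by omega),
                    pvSeg_succ_out r d 36 45 k (by omega), pvSeg_succ_out r d 46 60 k (by omega)]

theorem pvFoldP (r d : List Int) (k : Nat) :
    ((List.range k).map Int.ofNat).foldl (pvStepP r d) [0] =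
      (List.range (k + 1)).map (pvS r d) := by
  induction k with
  | zero => simp [pvS]
  | succ k ih =>
      rw [List.range_succ (n := k), List.map_append, List.foldl_append, ih]
      simp only [List.map_cons, List.map_nil, List.foldl_cons, List.foldl_nil]
      unfold pvStepP
      simp only [Int.ofNat_eq_natCast]
      have hlast : PySem.List.pyGetD ((List.range (k + 1)).map (pvS r d)) (-1) 0 = pvS r d k := by
        simp [PySem.List.pyGetD, PySem.List.pyGet?, PySem.List.pyIdx?]
      rw [hlast, PySem.List.pyGetD_natCast, PySem.List.pyGetD_natCast]
      rw [List.range_succ (n := k + 1), List.map_append]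
      simp [pvS_succ, pvD]
      ring

theorem pvBucket (r d : List Int) (k lo hi : Nat) (out : List Int) :
    pvStepOut (k : Int) ((List.range (k + 1)).map (pvS r d)) out ((lo : Int), (hi : Int)) =
      out ++ (if pvSeg r d lo hi k ≠ [] then [(pvSeg r d lo hi k).sum] else []) := by
  unfold pvStepOut
  by_cases hc : lo ≤ hi ∧ lo < k
  · have hcond : (lo : Int) ≤ min (hi : Int) ((k : Int) - 1) := by
      rcases hc with ⟨h1, h2⟩
      have : (lo : Int) ≤ (hi : Int) := by exact_mod_cast h1
      have : (lo : Int) ≤ (k : Int) - 1 := by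
        have : (lo : Int) < (k : Int) := by exact_mod_cast h2
        omega
      omega
    rw [if_pos hcond]
    have hidx : min (hi : Int) ((k : Int) - 1) + 1 = ((min (hi + 1) k : Nat) : Int) := by
      push_cast; omega
    rw [hidx, PySem.List.pyGetD_natCast, PySem.List.pyGetD_natCast,
      PySem.List.getD_map_range _ _ _ _ (by omega),
      PySem.List.getD_map_range _ _ _ _ (by omega)]
    have hne : pvSeg r d lo hi k ≠ [] := by
      unfold pvSeg
      simp only [ne_eq, List.map_eq_nil_iff, List.range'_eq_nil_iff]
      omega
    rw [if_pos hne]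
    unfold pvSeg
    rw [pvSum_range']
    have h : lo + (min (hi + 1) k - lo) = min (hi + 1) k := by omega
    rw [h]
  · have hcond : ¬ ((lo : Int) ≤ min (hi : Int) ((k : Int) - 1)) := by
      intro h
      apply hc
      constructor
      · exact_mod_cast le_trans h (min_le_left _ _)
      · have : (lo : Int) ≤ (k : Int) - 1 := le_trans h (min_le_right _ _)
        omega
    rw [if_neg hcond]
    have hemp : ¬ (pvSeg r d lo hi k ≠ []) := by
      unfold pvSeg
      simp only [ne_eq, List.map_eq_nil_iff, List.range'_eq_nil_iff, not_not]
      omega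
    rw [if_neg hemp]
    simp

theorem pvRangeBridge (N : Nat) :
    PySem.List.pyRange 0 ((N : Int) - 1) = (List.range (N - 1)).map Int.ofNat := by
  cases N with
  | zero => decide
  | succ n =>
      have h : ((n + 1 : Nat) : Int) - 1 = (n : Int) := by push_cast; ring
      rw [h, PySem.List.pyRange_zero_natCast]
      rfl

-- ===== VERDICT (by name: the statement is the Claim_ definition above) =====
theorem get_kills_advantage_per_stage_spec : Claim_equal_get_kills_advantage_per_stage := by
  intro radiant dire _ _
  unfold Spec_get_kills_advantage_per_stage
  unfold get_kills_advantage_per_stage get_kills_advantage_per_stage_alt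
  dsimp only
  rw [pvRangeBridge radiant.length, pvFoldA, pvFoldP]
  cases hN : radiant.length with
  | zero =>
      simp only [Nat.cast_zero, Nat.zero_sub]
      norm_num [pvSeg, pvStepOut, List.foldl]
  | succ k =>
      have hm : ((k + 1 : Nat) : Int) - 1 = (k : Int) := by push_cast; ring
      simp only [hm, Nat.succ_sub_one]
      simp only [List.foldl_cons, List.foldl_nil]
      have etop : (List.range' 61 (k - 61)).map (pvD radiant dire) = pvSeg radiant dire 61 (k - 1) k := by
        by_cases hk0 : k = 0
        · subst hk0; simp [pvSeg]
        · unfold pvSeg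
          rw [show min (k - 1 + 1) k - 61 = k - 61 from by omega]
      rw [etop]
      have e61 : ((k : Int) - 1) = (((k - 1 : Nat)) : Int) ∨ k = 0 := by
        by_cases hk0 : k = 0
        · right; exact hk0
        · left; omega
      by_cases hk0 : k = 0
      · subst hk0
        norm_num [pvSeg, pvStepOut]
      · have e1 : ((k : Int) - 1) = (((k - 1 : Nat)) : Int) := by omega
        rw [e1]
        simp only [show ((0:Int),(5:Int)) = (((0:Nat):Int),((5:Nat):Int)) from by norm_num,
          show ((6:Int),(15:Int)) = (((6:Nat):Int),((15:Nat):Int)) from by norm_num,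
          show ((16:Int),(25:Int)) = (((16:Nat):Int),((25:Nat):Int)) from by norm_num,
          show ((26:Int),(35:Int)) = (((26:Nat):Int),((35:Nat):Int)) from by norm_num,
          show ((36:Int),(45:Int)) = (((36:Nat):Int),((45:Nat):Int)) from by norm_num,
          show ((46:Int),(60:Int)) = (((46:Nat):Int),((60:Nat):Int)) from by norm_num,
          show ((61:Int)) = (((61:Nat):Int)) from by norm_num]
        rw [pvBucket radiant dire k 0 5, pvBucket radiant dire k 6 15,
          pvBucket radiant dire k 16 25, pvBucket radiant dire k 26 35,
          pvBucket radiant dire k 36 45, pvBucket radiant dire k 46 60,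
          pvBucket radiant dire k 61 (k - 1)]
        simp [List.append_assoc]
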